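-- pv_equiv track=rewrite | github.com/ioahKwon/PythonforEngineering | 2015312904_Week 09.py | better_salary
-- ===== SOURCE A (Python) =====
-- def better_salary(day):
--     if day <= 1:
--         return False
--     else:
--         option1 = day * 100
--         option2 = 2
--         for i in range(2, day+1):
--             option2 = option2 + (option2 *2)
--
--         if option1 > option2:
--             return 1
--         elif option1 == option2:
--             return 0
--         else:
--             return 2
-- ===== SOURCE B (Python) =====
-- def better_salary(day):
--     if day <= 1:
--         return False
--     # doubling-growth pay = 2 * 3**(day-1), computed by binary exponentiation
--     pay2 = 2
--     base = 3
--     e = day - 1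
--     while e:
--         if e & 1:
--             pay2 *= base
--         base *= base
--         e >>= 1
--     diff = day * 100 - pay2
--     return 1 if diff > 0 else (0 if diff == 0 else 2)
-- ===== Notes on version B (the rewrite author's own statement) =====
-- stated objective: faster
-- what changed: Replaces A's day-long accumulation loop (option2 += option2*2) by hand-written binary exponentiation computing 2*3**(day-1) in O(log day) steps, and compares via the sign of the difference.
-- outside the precondition, e.g. on better_salary(1): A returns False, B returns False; on better_salary(0): A returns False, B returns False
import Mathlib
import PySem

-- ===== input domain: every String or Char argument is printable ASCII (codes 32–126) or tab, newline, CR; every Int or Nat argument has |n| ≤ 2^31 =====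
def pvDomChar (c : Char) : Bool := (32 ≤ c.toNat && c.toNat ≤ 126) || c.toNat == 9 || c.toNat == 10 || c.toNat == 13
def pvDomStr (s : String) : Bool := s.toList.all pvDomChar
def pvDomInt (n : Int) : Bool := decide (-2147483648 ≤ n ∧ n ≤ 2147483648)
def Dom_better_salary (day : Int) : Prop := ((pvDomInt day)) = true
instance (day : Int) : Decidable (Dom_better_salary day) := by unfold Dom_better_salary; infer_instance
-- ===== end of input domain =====

-- B replaces A's day-long accumulation loop by hand-written binary exponentiation computing 2*3^(day-1), comparing by the sign of the difference: asymptotically fewer bignum multiplications.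


-- ===== PORT A =====
-- Literal port of A's loop: option2 starts at 2 and does option2 = option2 + option2*2 for i in range(2, day+1).
def better_salary (day : Int) : Int :=
  let option1 := day * 100
  let option2 := (PySem.List.pyRange 2 (day + 1) 1).foldl (fun acc _ => acc + acc * 2) 2
  if option1 > option2 then 1
  else if option1 = option2 then 0
  else 2

-- ===== PORT B =====
-- B's while-loop of binary exponentiation: accumulates into pay2, squares base, halves e.
def pvBinPow (pay2 base : Int) (e : Nat) : Int :=
  if e = 0 then pay2
  else pvBinPow (if e % 2 = 1 then pay2 * base else pay2) (base * base) (e / 2)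
decreasing_by exact Nat.div_lt_self (Nat.pos_of_ne_zero (by assumption)) (by norm_num)

def better_salary_alt (day : Int) : Int :=
  let pay2 := pvBinPow 2 3 (day - 1).toNat
  let diff := day * 100 - pay2
  if diff > 0 then 1 else if diff = 0 then 0 else 2

-- ===== PRECONDITION & SPEC =====
-- Pre_ excludes day ≤ 1: there A returns the bool False, not a value of the declared Int result type.
def Pre_better_salary (day : Int) : Prop := 2 ≤ day
instance (day : Int) : Decidable (Pre_better_salary day) := by unfold Pre_better_salary; infer_instance
def pvWitness_better_salary : Int := 5

def Spec_better_salary (day : Int) (out : Int) : Prop := out = better_salary_alt day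
instance (day : Int) (out : Int) : Decidable (Spec_better_salary day out) := by unfold Spec_better_salary; infer_instance

-- ===== CLAIM (what is proved, stated in full; the proofs are below) =====
def Claim_equal_better_salary : Prop := ∀ (day : Int), Dom_better_salary day → Pre_better_salary day → Spec_better_salary day (better_salary day)

-- ===== LEMMAS AND PROOFS =====
theorem foldl_triple (l : List Int) (c : Int) :
    l.foldl (fun acc _ => acc + acc * 2) c = c * 3 ^ l.length := by
  induction l generalizing c with
  | nil => simp
  | cons x xs ih =>
      simp only [List.foldl_cons, List.length_cons, ih]
      ring

theorem pvBinPow_eq (e : Nat) : ∀ acc base : Int, pvBinPow acc base e = acc * base ^ e := by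
  induction e using Nat.strong_induction_on with
  | _ e ih =>
    intro acc base
    unfold pvBinPow
    split
    · subst ‹e = 0›; simp
    · rw [ih (e / 2) (Nat.div_lt_self (Nat.pos_of_ne_zero ‹e ≠ 0›) (by norm_num))]
      have he : e = 2 * (e / 2) + e % 2 := (Nat.div_add_mod e 2).symm ▸ by omega
      rcases Nat.mod_two_eq_zero_or_one e with h | h
      · rw [if_neg (by omega)]
        calc acc * (base * base) ^ (e / 2) = acc * base ^ (2 * (e / 2)) := by
              rw [pow_mul]; ring_nf
          _ = acc * base ^ e := by rw [show 2 * (e / 2) = e by omega]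
      · rw [if_pos h]
        calc acc * base * (base * base) ^ (e / 2) = acc * base ^ (2 * (e / 2) + 1) := by
              rw [pow_succ, pow_mul]; ring_nf
          _ = acc * base ^ e := by rw [show 2 * (e / 2) + 1 = e by omega]

theorem loop_closed_form (day : Int) (h : 2 ≤ day) :
    (PySem.List.pyRange 2 (day + 1) 1).foldl (fun acc _ => acc + acc * 2) (2 : Int)
      = 2 * 3 ^ (day - 1).toNat := by
  rw [foldl_triple, PySem.List.length_pyRange_one]
  have h2 : (day + 1 - 2).toNat = (day - 1).toNat := by omega
  rw [h2]

-- ===== VERDICT (by name: the statement is the Claim_ definition above) =====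
theorem better_salary_spec : Claim_equal_better_salary := by
  intro day _ hpre
  unfold Spec_better_salary better_salary better_salary_alt
  rw [pvBinPow_eq, loop_closed_form day hpre]
  set p := (2 : Int) * 3 ^ (day - 1).toNat with hp
  simp only []
  split_ifs <;> omega
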